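-- pv_equiv track=rewrite | github.com/shalahuddinn/Programming-Aptitude | Question 7.py | solution
-- ===== SOURCE A (Python) =====
-- def solution(N):
--   numOfDigit = 0
--
--   resultOfPower = 11**N
--   n = resultOfPower
--
--   answer=0
--
--   #Calculate the number of digit
--   while(n!=0):
--     n = n // 10
--     numOfDigit+=1
--
--   #Calculate the number of digit 1
--   for i in range(numOfDigit-1, -1, -1):
--     divider = 10**i
--     currentDigit = (resultOfPower // divider)%10
--     if (currentDigit==1):
--       answer+=1
--
--   return answer
-- ===== SOURCE B (Python) =====
-- def solution(N):
--     answer = 0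
--     p = 11 ** N
--     while p != 0:
--         if p % 10 == 1:
--             answer += 1
--         p //= 10
--     return answer
-- ===== Notes on version B (the rewrite author's own statement) =====
-- stated objective: simpler
-- what changed: B replaces A's two passes (a digit-count loop followed by an MSB-first indexed extraction with 10**i dividers) by one LSB-first while loop that peels and tests digits directly.
import Mathlib
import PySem

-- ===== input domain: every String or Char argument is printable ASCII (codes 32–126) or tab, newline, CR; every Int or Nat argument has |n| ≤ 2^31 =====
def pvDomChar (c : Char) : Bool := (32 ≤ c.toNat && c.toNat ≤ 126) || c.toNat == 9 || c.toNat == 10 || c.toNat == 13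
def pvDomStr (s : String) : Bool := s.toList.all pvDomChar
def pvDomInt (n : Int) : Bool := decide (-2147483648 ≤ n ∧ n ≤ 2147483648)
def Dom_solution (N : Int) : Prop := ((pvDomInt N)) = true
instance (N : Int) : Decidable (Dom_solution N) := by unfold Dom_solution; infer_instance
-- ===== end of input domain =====

-- B replaces A's two passes (digit count, then MSB-first indexed digit extraction) by a single
-- LSB-first digit-peeling loop; same return value on all N ≥ 0 (objective: simpler).


-- ===== PORT A =====
-- A's 'while n != 0: n //= 10; numOfDigit += 1'; the '0 < n' guard only makes the loop total
-- (under Pre_ the loop variable is always nonnegative, so it is the same condition as 'n != 0').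
def pvCountDigits (n : Int) : Int :=
  if h : 0 < n then pvCountDigits (PySem.Int.floordiv n 10) + 1 else 0
termination_by n.toNat
decreasing_by
  rw [PySem.Int.floordiv_eq_ediv_of_pos (by omega)]
  omega

-- For N < 0 Python's 11**N is a float in (0,1) (or 0.0 after underflow); every digit it
-- contributes under floor-division by 10 is 0 and the returned answer is 0, exactly as for the
-- integer 0 — so the power is represented by 0 there (exact on the return value for all N).
def solution (N : Int) : Int :=
  let resultOfPower : Int := if N < 0 then 0 else 11 ^ N.toNat
  let numOfDigit := pvCountDigits resultOfPower
  (PySem.List.pyRange (numOfDigit - 1) (-1) (-1)).foldl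
    (fun answer i =>
      let divider : Int := 10 ^ i.toNat
      let currentDigit := PySem.Int.mod (PySem.Int.floordiv resultOfPower divider) 10
      if currentDigit = 1 then answer + 1 else answer) 0

-- ===== PORT B =====
-- B's 'while p != 0' loop; '0 < p' is the same totality guard as above.
-- same representation of 11**N for N < 0 as in port A (exact on the return value).
def pvPeel (p answer : Int) : Int :=
  if h : 0 < p then
    pvPeel (PySem.Int.floordiv p 10)
      (if PySem.Int.mod p 10 = 1 then answer + 1 else answer)
  else answer
termination_by p.toNat
decreasing_by
  rw [PySem.Int.floordiv_eq_ediv_of_pos (by omega)]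
  omega

def solution_alt (N : Int) : Int := pvPeel (if N < 0 then 0 else 11 ^ N.toNat) 0

-- ===== PRECONDITION & SPEC =====
def Spec_solution (N : Int) (out : Int) : Prop := out = solution_alt N
instance (N : Int) (out : Int) : Decidable (Spec_solution N out) := by unfold Spec_solution; infer_instance

-- ===== CLAIM (what is proved, stated in full; the proofs are below) =====
def Claim_equal_solution : Prop := ∀ (N : Int), Dom_solution N → Spec_solution N (solution N)

-- ===== LEMMAS AND PROOFS =====

theorem pvCountDigits_nonneg (n : Int) : 0 ≤ pvCountDigits n := by
  unfold pvCountDigits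
  split
  · have := pvCountDigits_nonneg (PySem.Int.floordiv n 10)
    omega
  · omega
termination_by n.toNat
decreasing_by
  rw [PySem.Int.floordiv_eq_ediv_of_pos (by omega)]
  omega

-- m is bounded by 10 ^ (number of digits of m)
theorem pvCountDigits_bound (n : Int) (hn : 0 ≤ n) : n < 10 ^ (pvCountDigits n).toNat := by
  unfold pvCountDigits
  split
  · rename_i h
    rw [PySem.Int.floordiv_eq_ediv_of_pos (by omega)]
    have ih := pvCountDigits_bound (n / 10) (by omega)
    have h10 : (10:Int) * (n / 10) + (n % 10) = n := by omega
    have hnn : 0 ≤ pvCountDigits (n / 10) := pvCountDigits_nonneg (n / 10)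
    have : (pvCountDigits (n / 10) + 1).toNat = (pvCountDigits (n / 10)).toNat + 1 := by omega
    rw [this, pow_succ]
    have hm : n % 10 < 10 := Int.emod_lt_of_pos n (by norm_num)
    nlinarith
  · simp; omega
termination_by n.toNat
decreasing_by
  omega

-- A's accumulator loop is a count
theorem foldl_ite_count (l : List Int) (P : Int → Prop) [DecidablePred P] (acc : Int) :
    l.foldl (fun a i => if P i then a + 1 else a) acc = acc + (l.countP (fun i => decide (P i)) : Int) := by
  induction l generalizing acc with
  | nil => simp
  | cons x t ih =>
      simp only [List.foldl_cons, List.countP_cons, ih]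
      by_cases h : P x <;> simp [h] <;> push_cast <;> omega
  
-- core: counting over ascending Nat indices equals the peel loop, for any digit bound d
theorem count_eq_peel (d : Nat) (m acc : Int) (hm : 0 ≤ m) (hb : m < 10 ^ d) :
    acc + (((List.range d).countP
        (fun k => decide (PySem.Int.mod (PySem.Int.floordiv m (10 ^ k)) 10 = 1))) : Int)
      = pvPeel m acc := by
  induction d generalizing m acc with
  | zero =>
      have hm0 : m = 0 := by simp only [pow_zero] at hb; omega
      subst hm0
      rw [pvPeel]; simp
  | succ d ih =>
      rw [pvPeel]
      split
      · rename_i h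
        have hdiv : PySem.Int.floordiv m 10 = m / 10 :=
          PySem.Int.floordiv_eq_ediv_of_pos (by norm_num)
        have hshift : ∀ k : Nat,
            PySem.Int.floordiv m (10 ^ (k + 1)) = PySem.Int.floordiv (m / 10) (10 ^ k) := by
          intro k
          rw [PySem.Int.floordiv_eq_ediv_of_pos (by positivity),
              PySem.Int.floordiv_eq_ediv_of_pos (by positivity),
              pow_succ, mul_comm, ← Int.ediv_ediv_of_nonneg (show (0:Int) ≤ 10 by norm_num)]
        rw [List.range_succ_eq_map, List.countP_cons, List.countP_map]
        have hble : m / 10 < 10 ^ d := by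
          have hp : (10:Int) ^ (d+1) = 10 * 10 ^ d := by ring
          rw [hp] at hb
          generalize (10:Int) ^ d = P at hb ⊢
          omega
        have hcnt : ((fun k => decide (PySem.Int.mod (PySem.Int.floordiv m (10 ^ k)) 10 = 1)) ∘
              Nat.succ)
            = fun k => decide (PySem.Int.mod (PySem.Int.floordiv (m / 10) (10 ^ k)) 10 = 1) := by
          funext k
          simp only [Function.comp_apply, Nat.succ_eq_add_one]
          rw [hshift k]
        rw [hcnt, hdiv, ← ih (m / 10) (if PySem.Int.mod m 10 = 1 then acc + 1 else acc)
              (by omega) hble]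
        have h0 : (decide (PySem.Int.mod (PySem.Int.floordiv m (10 ^ (0:Nat))) 10 = 1))
            = decide (PySem.Int.mod m 10 = 1) := by
          rw [pow_zero, PySem.Int.floordiv_eq_ediv_of_pos (by norm_num), Int.ediv_one]
        rw [h0]
        by_cases hone : PySem.Int.mod m 10 = 1 <;> simp only [hone, decide_true, decide_false,
          if_true, if_false, Nat.cast_add, Nat.cast_one, Nat.cast_zero, Nat.add_zero] <;> push_cast <;> ring
      · rename_i h
        have hm0 : m = 0 := by omega
        subst hm0
        have : ∀ k ∈ List.range d.succ,
            (decide (PySem.Int.mod (PySem.Int.floordiv 0 (10 ^ k)) 10 = 1)) = false := by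
          intro k _
          have : PySem.Int.floordiv 0 ((10:Int) ^ k) = 0 := by
            rw [PySem.Int.floordiv_eq_ediv_of_pos (by positivity)]; simp
          simp [this, PySem.Int.mod_eq_emod_of_pos (show (0:Int) < 10 by norm_num)]
        rw [List.countP_eq_zero.mpr (by intro k hk; simpa using this k hk)]
        simp

theorem solution_eq_aux (N : Int) : solution N = solution_alt N := by
  unfold solution solution_alt
  have hm0 : (0:Int) ≤ (if N < 0 then (0:Int) else 11 ^ N.toNat) := by split <;> positivity
  generalize (if N < 0 then (0:Int) else 11 ^ N.toNat) = m at hm0 ⊢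
  have hdnn : 0 ≤ pvCountDigits m := pvCountDigits_nonneg _
  rw [foldl_ite_count]
  rw [PySem.List.pyRange_neg_one_eq_reverse, List.countP_reverse]
  have hr : (-1 : Int) + 1 = 0 := by norm_num
  rw [hr, show pvCountDigits m - 1 + 1 = pvCountDigits m from by ring]
  rw [PySem.List.pyRange_one, List.countP_map]
  have hb := pvCountDigits_bound m hm0
  rw [← count_eq_peel (pvCountDigits m - 0).toNat m 0 hm0 (by simpa using hb)]
  congr 2
  apply List.countP_congr
  intro k _
  simp only [Function.comp_apply, zero_add, Int.toNat_natCast]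
  exact Iff.rfl

theorem solution_spec : Claim_equal_solution := by
  intro N _
  unfold Spec_solution
  exact solution_eq_aux N
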